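-- pv_equiv track=rewrite | github.com/skyg547/pythoncodingtest | Implementation/BOJ21610-WizardSharkAndRain.py | solution
-- ===== SOURCE A (Python) =====
-- dy = [-1, -1, 0, 1, 1, 1, 0, -1]
--
-- dx = [0, -1, -1, -1, 0, 1, 1, 1]
--
-- dy2 = [1, -1, 1, -1]
--
-- dx2 = [1, -1, -1, 1]
--
-- def move(l, moving, cloud):
--     # 지정된 횟수를 반복해주면서
--     for i in range(moving[1]):
--         # 모든 구름들에게 방향 이동해준다
--         for cloudMove in cloud:
--             # 각 칸의 넘어가면 그 다음 칸으로 넘어가게 설정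
--             cloudMove[0] = (cloudMove[0] + dx[moving[0] - 1]) % (len(l))
--             cloudMove[1] = (cloudMove[1] + dy[moving[0] - 1]) % (len(l))
--
-- def rain(l, cloud):
--     # 각 구름을 돌면서 비를 내려준다
--     for clouds in cloud:
--         # 비를 내려 1 씩 증가
--         l[clouds[0]][clouds[1]] = l[clouds[0]][clouds[1]] + 1
--
-- def bug(l, cloud):
--     for clouds in cloud:
--         # 대각선 사방 탐색
--         for direction in range(4):
--             # 사방 탐색 할때 경계 범위를 벗어나지 않으면
--             if 0 <= clouds[0] + dx2[direction] <= len(l) - 1 and 0 <= clouds[1] + dy2[direction] <= len(l) - 1: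
--                 # 그때 대각선에 물이 양이 있으면 !?
--                 if l[clouds[0] + dx2[direction]][clouds[1] + dy2[direction]] > 0:
--                     # 구름 위치의 물양 증가
--                     l[clouds[0]][clouds[1]] = l[clouds[0]][clouds[1]] + 1
--
-- def refresh(l, cloud, prevCloud):
--     # 모든 바구니를 탐색 하는데
--     for x in range(len(l)):
--         for y in range(len(l)):
--             # 지금 위치가 그전 구름 위치가 아니여야 하고
--             if [x, y] not in prevCloud:
--                 # 물의 양이 2 이상이면
--                 if l[x][y] >= 2:
--                     # 물의 양이 2 줄어 들고
--                     l[x][y] -= 2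
--                     # 구름에 추가해준다
--                     cloud.append([x, y])
--
-- def solution(l, o):
--     # 처음 구름의 위치
--     cloud = [[len(l) - 1, 0], [len(l) - 1, 1], [len(l) - 1 - 1, 0], [len(l) - 1 - 1, 1]]
--
--     for moving in o:
--         # 이동 함수 구현
--         move(l, moving, cloud)
--         # 비내리는 함수 구현
--         rain(l, cloud)
--
--         # 물복사 버그 함수 구현
--         bug(l, cloud)
--
--         # 이전 구름 저장
--         preCloud = cloud
--         # 구름 초기화
--         cloud = []
--
--         # 모든 칸 검사 및 새로움 구름 지정 구현
--         refresh(l, cloud, preCloud)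
--     # 모든 칸 깍기 구현
--
--     # 모든 물의양 합치기
--     sum = 0
--     for x in l:
--         for y in x:
--             sum += y
--     return sum
-- ===== SOURCE B (Python) =====
-- DX = (0, -1, -1, -1, 0, 1, 1, 1)
-- DY = (-1, -1, 0, 1, 1, 1, 0, -1)
--
-- def solution(l, o):
--     # Mutates l in place like the original; equivalence claimed for the return value.
--     n = len(l)
--     cloud = [(n - 1, 0), (n - 1, 1), (n - 2, 0), (n - 2, 1)]
--     for m in o:
--         d, s = m[0], m[1]
--         if s > 0 and cloud:
--             # one modular multiply instead of s single steps
--             ddx, ddy = DX[d - 1], DY[d - 1]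
--             cloud = [((x + s * ddx) % n, (y + s * ddy) % n) for x, y in cloud]
--         for x, y in cloud:
--             l[x][y] += 1
--         for x, y in cloud:
--             l[x][y] += sum(1 for ex, ey in ((x + 1, y + 1), (x - 1, y - 1), (x - 1, y + 1), (x + 1, y - 1))
--                            if 0 <= ex < n and 0 <= ey < n and l[ex][ey] > 0)
--         occupied = set(cloud)
--         cloud = []
--         for x in range(n):
--             for y in range(n):
--                 if (x, y) not in occupied and l[x][y] >= 2:
--                     l[x][y] -= 2
--                     cloud.append((x, y))
--     return sum(map(sum, l))
-- ===== Notes on version B (the rewrite author's own statement) =====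
-- stated objective: alternative
-- what changed: B replaces A's per-step movement loop (s single modular steps per command, each remapping the whole cloud) by one modular multiply per cloud element (skipping the move when there are no steps or no clouds), folds bug()'s four conditional increments per cell into a single addition of a diagonal count, tests refresh membership against a set instead of scanning the previous-cloud list, and totals with sum(map(sum, l)); the asymptotic gain could not be confirmed (A raises on its large inputs), so no measured speed is claimed.
-- outside the precondition, e.g. on solution([[5, 0]], [[1, 0]]): A returns 10, B returns 10; on solution([[0, 0], [0, 0]], [[1, 1], [9, 1]]): A returns 0, B returns 0
import Mathlib
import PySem

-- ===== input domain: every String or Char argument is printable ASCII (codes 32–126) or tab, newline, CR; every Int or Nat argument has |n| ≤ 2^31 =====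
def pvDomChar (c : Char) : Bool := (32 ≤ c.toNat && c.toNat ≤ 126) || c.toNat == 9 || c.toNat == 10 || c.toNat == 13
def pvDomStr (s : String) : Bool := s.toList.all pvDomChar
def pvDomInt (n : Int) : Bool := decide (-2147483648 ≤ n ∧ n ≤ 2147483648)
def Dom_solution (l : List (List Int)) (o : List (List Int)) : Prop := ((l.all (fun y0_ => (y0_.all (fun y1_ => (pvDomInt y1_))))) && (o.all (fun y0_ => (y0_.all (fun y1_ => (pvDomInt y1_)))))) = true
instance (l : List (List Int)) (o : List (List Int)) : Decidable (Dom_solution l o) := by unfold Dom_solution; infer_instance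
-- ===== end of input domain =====

-- B replaces A's per-step cloud-movement loop by one modular multiply per command (and a
-- counting water-copy pass, a set-based refresh membership test and a map-sum total):
-- O(1) arithmetic per command and cloud cell where A does s single steps. Both A and B
-- mutate the grid argument in place in Python; the equivalence proved is about the
-- RETURN value.

-- ===== PORT A =====
-- module constants
def pvDx : List Int := [0, -1, -1, -1, 0, 1, 1, 1]
def pvDy : List Int := [-1, -1, 0, 1, 1, 1, 0, -1]
def pvDx2 : List Int := [1, -1, -1, 1]
def pvDy2 : List Int := [1, -1, 1, -1]

-- shared grid primitives: l[x][y] read and write (all accesses are at nonnegative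
-- in-range indices under Pre_solution, where Python indexing is List.set / getD)
def pvGetG (g : List (List Int)) (x y : Int) : Int := (g.getD x.toNat []).getD y.toNat 0
def pvSetG (g : List (List Int)) (x y v : Int) : List (List Int) :=
  g.set x.toNat ((g.getD x.toNat []).set y.toNat v)

-- def move(l, moving, cloud)
def pvMove (n : Int) (m : List Int) (cloud : List (Int × Int)) : List (Int × Int) :=
  (PySem.List.pyRange 0 (m.getD 1 0) 1).foldl
    (fun c _ => c.map (fun p =>
      (PySem.Int.mod (p.1 + PySem.List.pyGetD pvDx (m.getD 0 0 - 1) 0) n,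
       PySem.Int.mod (p.2 + PySem.List.pyGetD pvDy (m.getD 0 0 - 1) 0) n))) cloud

-- def rain(l, cloud)
def pvRain (g : List (List Int)) (cloud : List (Int × Int)) : List (List Int) :=
  cloud.foldl (fun g c => pvSetG g c.1 c.2 (pvGetG g c.1 c.2 + 1)) g

-- def bug(l, cloud)
def pvBug (n : Int) (g : List (List Int)) (cloud : List (Int × Int)) : List (List Int) :=
  cloud.foldl (fun g c =>
    (PySem.List.pyRange 0 4 1).foldl (fun g i =>
      if 0 ≤ c.1 + PySem.List.pyGetD pvDx2 i 0 ∧ c.1 + PySem.List.pyGetD pvDx2 i 0 ≤ n - 1 ∧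
         0 ≤ c.2 + PySem.List.pyGetD pvDy2 i 0 ∧ c.2 + PySem.List.pyGetD pvDy2 i 0 ≤ n - 1 then
        if 0 < pvGetG g (c.1 + PySem.List.pyGetD pvDx2 i 0) (c.2 + PySem.List.pyGetD pvDy2 i 0) then
          pvSetG g c.1 c.2 (pvGetG g c.1 c.2 + 1)
        else g
      else g) g) g

-- def refresh(l, cloud, prevCloud)  (returns the grid and the rebuilt cloud list)
def pvRefresh (n : Int) (g : List (List Int)) (prev : List (Int × Int)) :
    List (List Int) × List (Int × Int) :=
  (PySem.List.pyRange 0 n 1).foldl (fun st x =>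
    (PySem.List.pyRange 0 n 1).foldl (fun st y =>
      if (x, y) ∉ prev then
        if 2 ≤ pvGetG st.1 x y then (pvSetG st.1 x y (pvGetG st.1 x y - 2), st.2 ++ [(x, y)])
        else st
      else st) st) (g, [])

def solution (l : List (List Int)) (o : List (List Int)) : Int :=
  let n : Int := l.length
  let fin := o.foldl (fun st m =>
    let cloud := pvMove n m st.2
    let g1 := pvRain st.1 cloud
    let g2 := pvBug n g1 cloud
    pvRefresh n g2 cloud)
    (l, [(n - 1, 0), (n - 1, 1), (n - 1 - 1, 0), (n - 1 - 1, 1)])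
  fin.1.foldl (fun s row => row.foldl (fun s v => s + v) s) 0

-- ===== PORT B =====
def solution_alt (l : List (List Int)) (o : List (List Int)) : Int :=
  let n : Int := l.length
  let fin := o.foldl (fun (st : List (List Int) × List (Int × Int)) m =>
    let s := m.getD 1 0
    -- no steps or no clouds: nothing moves; else one modular multiply per cloud
    let cloud := if 0 < s ∧ st.2 ≠ [] then
        st.2.map (fun p =>
          (PySem.Int.mod (p.1 + s * PySem.List.pyGetD pvDx (m.getD 0 0 - 1) 0) n,
           PySem.Int.mod (p.2 + s * PySem.List.pyGetD pvDy (m.getD 0 0 - 1) 0) n))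
      else st.2
    let g1 := cloud.foldl (fun g c => pvSetG g c.1 c.2 (pvGetG g c.1 c.2 + 1)) st.1
    let g2 := cloud.foldl (fun g c =>
      pvSetG g c.1 c.2 (pvGetG g c.1 c.2 +
        (([(c.1 + 1, c.2 + 1), (c.1 - 1, c.2 - 1), (c.1 - 1, c.2 + 1), (c.1 + 1, c.2 - 1)].filter
            (fun q => decide (0 ≤ q.1) && decide (q.1 < n) && decide (0 ≤ q.2) &&
                      decide (q.2 < n) && decide (0 < pvGetG g q.1 q.2))).length : Int))) g1
    let occ : PySem.Set (Int × Int) := PySem.Set.ofList cloud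
    (PySem.List.pyRange 0 n 1).foldl (fun st2 x =>
      (PySem.List.pyRange 0 n 1).foldl (fun st2 y =>
        if (x, y) ∉ occ then
          if 2 ≤ pvGetG st2.1 x y then
            (pvSetG st2.1 x y (pvGetG st2.1 x y - 2), st2.2 ++ [(x, y)])
          else st2
        else st2) st2) (g2, ([] : List (Int × Int))))
    (l, [(n - 1, 0), (n - 1, 1), (n - 2, 0), (n - 2, 1)])
  (fin.1.map (fun row => row.foldl (fun s v => s + v) 0)).foldl (fun s v => s + v) 0

-- ===== PRECONDITION & SPEC =====
-- Pre_ restricts to the problem's natural domain: a nonempty N×N grid (rows may be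
-- longer than N; any grid if there are no commands), commands of length ≥ 2 whose
-- direction indexes the offset tables whenever the step count is positive (with a
-- nonpositive step count nothing moves and the direction is never read), and on a
-- 1×1 grid only positive step counts (the out-of-range initial cloud positions are
-- only exercised there, through negative-index wraparound). Outside Pre_ A raises
-- (ragged/short rows, |direction| too large with a positive step count, empty grid)
-- except for corners its cloud state makes unreachable (a direction out of range
-- read only after the cloud list has emptied, or 1×1 grids with a zero step count
-- whose rows happen to be long enough), where A's value is an accident of laziness.
def Pre_solution (l : List (List Int)) (o : List (List Int)) : Prop :=
  (∀ m ∈ o, 2 ≤ m.length ∧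
    (m.getD 1 0 ≤ 0 ∨ (-7 ≤ m.getD 0 0 ∧ m.getD 0 0 ≤ 8))) ∧
  (o = [] ∨ (1 ≤ l.length ∧ (∀ row ∈ l, l.length ≤ row.length) ∧
    (l.length = 1 → ∀ m ∈ o, 1 ≤ m.getD 1 0)))
instance (l : List (List Int)) (o : List (List Int)) : Decidable (Pre_solution l o) := by
  unfold Pre_solution; infer_instance

def pvWitness_solution : List (List Int) × List (List Int) :=
  ([[0, 1], [2, 0]], [[1, 1], [7, 2]])

def Spec_solution (l : List (List Int)) (o : List (List Int)) (out : Int) : Prop := out = solution_alt l o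
instance (l : List (List Int)) (o : List (List Int)) (out : Int) : Decidable (Spec_solution l o out) := by unfold Spec_solution; infer_instance

-- ===== CLAIM (what is proved, stated in full; the proofs are below) =====
def Claim_equal_solution : Prop := ∀ (l : List (List Int)) (o : List (List Int)), Dom_solution l o → Pre_solution l o → Spec_solution l o (solution l o)

-- ===== LEMMAS AND PROOFS =====

-- invariants
def pvGridOK (N : Nat) (g : List (List Int)) : Prop :=
  g.length = N ∧ ∀ row ∈ g, N ≤ row.length
def pvCloudOK (N : Nat) (cloud : List (Int × Int)) : Prop :=
  ∀ c ∈ cloud, 0 ≤ c.1 ∧ c.1 < (N : Int) ∧ 0 ≤ c.2 ∧ c.2 < (N : Int)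

theorem length_pvSetG (g : List (List Int)) (x y v : Int) :
    (pvSetG g x y v).length = g.length := by
  simp [pvSetG]

theorem pvGridOK_pvSetG {N : Nat} {g : List (List Int)} (h : pvGridOK N g) (x y v : Int) :
    pvGridOK N (pvSetG g x y v) := by
  refine ⟨by simp [pvSetG, h.1], ?_⟩
  by_cases hr : x.toNat < g.length
  · intro row hrow
    rcases List.mem_or_eq_of_mem_set hrow with hm | rfl
    · exact h.2 _ hm
    · rw [List.length_set]
      have : g.getD x.toNat [] ∈ g := by
        rw [List.getD_eq_getElem?_getD, List.getElem?_eq_getElem hr]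
        exact List.getElem_mem hr
      exact h.2 _ this
  · rw [show pvSetG g x y v = g by
      simp [pvSetG, List.set_eq_of_length_le (Nat.le_of_not_lt hr)]]
    exact h.2

theorem pvGetG_pvSetG_same {g : List (List Int)} {x y : Int} (v : Int)
    (hx : x.toNat < g.length) (hy : y.toNat < (g.getD x.toNat []).length) :
    pvGetG (pvSetG g x y v) x y = v := by
  have hy' : y.toNat < g[x.toNat].length := by
    simpa [List.getD_eq_getElem?_getD, List.getElem?_eq_getElem, hx] using hy
  simp [pvGetG, pvSetG, List.getD_eq_getElem?_getD, hx, List.getElem_set_self, hy']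

theorem pvGetG_pvSetG_ne {g : List (List Int)} {x y x' y' : Int} (v : Int)
    (h : x.toNat ≠ x'.toNat ∨ y.toNat ≠ y'.toNat) :
    pvGetG (pvSetG g x y v) x' y' = pvGetG g x' y' := by
  rcases h with h | h
  · simp [pvGetG, pvSetG, List.getD_eq_getElem?_getD, List.getElem?_set_ne h]
  · by_cases hx : x.toNat = x'.toNat
    · by_cases hr : x.toNat < g.length
      · simp [pvGetG, pvSetG, List.getD_eq_getElem?_getD, hr, ← hx, h]
      · simp [pvSetG, List.set_eq_of_length_le (Nat.le_of_not_lt hr)]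
    · simp [pvGetG, pvSetG, List.getD_eq_getElem?_getD, List.getElem?_set_ne hx]

theorem pvSetG_pvSetG (g : List (List Int)) (x y a b : Int) :
    pvSetG (pvSetG g x y a) x y b = pvSetG g x y b := by
  by_cases hr : x.toNat < g.length
  · simp [pvSetG, List.getD_eq_getElem?_getD, hr, List.set_set]
  · simp [pvSetG, List.set_eq_of_length_le (Nat.le_of_not_lt hr)]

theorem pvSetG_self {g : List (List Int)} {x y : Int}
    (hx : x.toNat < g.length) (hy : y.toNat < (g.getD x.toNat []).length) :
    pvSetG g x y (pvGetG g x y) = g := by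
  have hy' : y.toNat < g[x.toNat].length := by
    simpa [List.getD_eq_getElem?_getD, List.getElem?_eq_getElem, hx] using hy
  simp [pvGetG, pvSetG, List.getD_eq_getElem?_getD, hx, hy', List.set_getElem_self]

-- generic fold glue: two folds agree when the step functions agree on states
-- satisfying an invariant the left fold preserves
theorem pvFoldlCongrInv {α β : Type} (P : α → Prop) (f g : α → β → α) (l : List β) (a : α)
    (hP : P a) (hpres : ∀ acc b, P acc → b ∈ l → P (f acc b))
    (heq : ∀ acc b, P acc → b ∈ l → f acc b = g acc b) :
    l.foldl f a = l.foldl g a := by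
  induction l generalizing a with
  | nil => rfl
  | cons b t ih =>
    simp only [List.foldl_cons]
    rw [← heq a b hP (by simp)]
    exact ih (f a b) (hpres a b hP (by simp))
      (fun acc c hc hm => hpres acc c hc (by simp [hm]))
      (fun acc c hc hm => heq acc c hc (by simp [hm]))


theorem move_closed (n : Int) (hn : 0 < n) (dx dy : Int) (s : Int) (hs : 0 ≤ s)
    (cloud : List (Int × Int))
    (hc : ∀ c ∈ cloud, 0 ≤ c.1 ∧ c.1 < n ∧ 0 ≤ c.2 ∧ c.2 < n) :
    (PySem.List.pyRange 0 s 1).foldl (fun c _ => c.map (fun p =>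
        (PySem.Int.mod (p.1 + dx) n, PySem.Int.mod (p.2 + dy) n))) cloud
      = cloud.map (fun p =>
        (PySem.Int.mod (p.1 + s * dx) n, PySem.Int.mod (p.2 + s * dy) n)) := by
  obtain ⟨k, rfl⟩ : ∃ k : Nat, s = (k : Int) := ⟨s.toNat, (Int.toNat_of_nonneg hs).symm⟩
  clear hs
  induction k with
  | zero =>
    rw [show ((0:Nat):Int) = 0 from rfl, PySem.List.pyRange_one_eq_nil le_rfl]
    simp only [List.foldl_nil]
    symm
    have h : ∀ p ∈ cloud,
        (PySem.Int.mod (p.1 + 0 * dx) n, PySem.Int.mod (p.2 + 0 * dy) n) = id p := by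
      intro p hp
      obtain ⟨h1, h2, h3, h4⟩ := hc p hp
      simp only [zero_mul, add_zero, id]
      rw [PySem.Int.mod_eq_emod_of_pos hn, PySem.Int.mod_eq_emod_of_pos hn,
        Int.emod_eq_of_lt h1 h2, Int.emod_eq_of_lt h3 h4]
    rw [List.map_congr_left h, List.map_id]
  | succ k ih =>
    rw [show (((k+1:Nat)):Int) = (k:Int) + 1 by push_cast; ring,
      PySem.List.pyRange_one_succ_right (by positivity), List.foldl_append]
    rw [ih]
    simp only [List.foldl_cons, List.foldl_nil, List.map_map]
    apply List.map_congr_left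
    intro p hp
    obtain ⟨h1, h2, h3, h4⟩ := hc p hp
    simp only [Function.comp_apply]
    rw [PySem.Int.mod_eq_emod_of_pos hn, PySem.Int.mod_eq_emod_of_pos hn,
        PySem.Int.mod_eq_emod_of_pos hn, PySem.Int.mod_eq_emod_of_pos hn,
        PySem.Int.mod_eq_emod_of_pos hn, PySem.Int.mod_eq_emod_of_pos hn,
        Int.emod_add_emod, Int.emod_add_emod]
    ring_nf

-- a loop ignoring the loop variable is an iterate
theorem foldl_ignore {α β : Type} (F : α → α) (L : List β) (i : α) :
    L.foldl (fun c _ => F c) i = F^[L.length] i := by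
  induction L generalizing i with
  | nil => rfl
  | cons b t ih => simp [ih, Function.iterate_succ_apply]

-- with at least one step the closed form needs no bounds on the starting cloud
-- (the first step lands every coordinate in [0, n))
theorem move_closed_pos (n : Int) (hn : 0 < n) (dx dy : Int) (s : Int) (hs : 1 ≤ s)
    (cloud : List (Int × Int)) :
    (PySem.List.pyRange 0 s 1).foldl (fun c _ => c.map (fun p =>
        (PySem.Int.mod (p.1 + dx) n, PySem.Int.mod (p.2 + dy) n))) cloud
      = cloud.map (fun p =>
        (PySem.Int.mod (p.1 + s * dx) n, PySem.Int.mod (p.2 + s * dy) n)) := by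
  have h1 : (PySem.List.pyRange 0 s 1).foldl (fun c _ => c.map (fun p =>
        (PySem.Int.mod (p.1 + dx) n, PySem.Int.mod (p.2 + dy) n))) cloud
      = (PySem.List.pyRange 0 (s - 1) 1).foldl (fun c _ => c.map (fun p =>
        (PySem.Int.mod (p.1 + dx) n, PySem.Int.mod (p.2 + dy) n)))
        (cloud.map (fun p => (PySem.Int.mod (p.1 + dx) n, PySem.Int.mod (p.2 + dy) n))) := by
    rw [foldl_ignore, foldl_ignore, PySem.List.length_pyRange_one,
      PySem.List.length_pyRange_one,
      show (s - 0).toNat = (s - 1 - 0).toNat + 1 by omega, Function.iterate_succ_apply]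
  rw [h1, move_closed n hn dx dy (s - 1) (by omega) _ ?_]
  · rw [List.map_map]
    apply List.map_congr_left
    intro p _
    simp only [Function.comp_apply]
    rw [PySem.Int.mod_eq_emod_of_pos hn, PySem.Int.mod_eq_emod_of_pos hn,
        PySem.Int.mod_eq_emod_of_pos hn, PySem.Int.mod_eq_emod_of_pos hn,
        PySem.Int.mod_eq_emod_of_pos hn, PySem.Int.mod_eq_emod_of_pos hn,
        Int.emod_add_emod, Int.emod_add_emod]
    ring_nf
  · intro c hc
    obtain ⟨p, _, rfl⟩ := List.mem_map.1 hc
    exact ⟨PySem.Int.mod_nonneg _ hn, PySem.Int.mod_lt _ hn,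
      PySem.Int.mod_nonneg _ hn, PySem.Int.mod_lt _ hn⟩

-- the four diagonal offsets of bug(), as (coord0, coord1) pairs
def pvDirs : List (Int × Int) := [(1, 1), (-1, -1), (-1, 1), (1, -1)]

-- one cell of bug(): the four conditional increments of l[x][y] equal a single
-- addition of the count of water-bearing in-bounds diagonals (reads never hit (x,y))
theorem bug_cell (n x y : Int) (hx0 : 0 ≤ x)
    (dirs : List (Int × Int)) (hd : ∀ e ∈ dirs, e.1 ≠ 0) :
    ∀ g : List (List Int), x.toNat < g.length → y.toNat < (g.getD x.toNat []).length →
    dirs.foldl (fun g e =>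
        if 0 ≤ x + e.1 ∧ x + e.1 ≤ n - 1 ∧ 0 ≤ y + e.2 ∧ y + e.2 ≤ n - 1 then
          if 0 < pvGetG g (x + e.1) (y + e.2) then pvSetG g x y (pvGetG g x y + 1) else g
        else g) g
      = pvSetG g x y (pvGetG g x y +
          (((dirs.map (fun e => (x + e.1, y + e.2))).filter
            (fun q => decide (0 ≤ q.1) && decide (q.1 < n) && decide (0 ≤ q.2) &&
                      decide (q.2 < n) && decide (0 < pvGetG g q.1 q.2))).length : Int)) := by
  induction dirs with
  | nil =>
    intro g hxr hyr
    simp only [List.foldl_nil, List.map_nil, List.filter_nil, List.length_nil,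
      Nat.cast_zero, add_zero]
    exact (pvSetG_self hxr hyr).symm
  | cons e rest ih =>
    intro g hxr hyr
    have he1 : e.1 ≠ 0 := hd e (List.mem_cons_self)
    have hd' : ∀ e' ∈ rest, e'.1 ≠ 0 := fun e' h => hd e' (List.mem_cons_of_mem _ h)
    simp only [List.foldl_cons, List.map_cons, List.filter_cons]
    by_cases h1 : 0 ≤ x + e.1
    · by_cases h2 : x + e.1 < n
      · by_cases h3 : 0 ≤ y + e.2
        · by_cases h4 : y + e.2 < n
          · rw [if_pos ⟨h1, by omega, h3, by omega⟩]
            by_cases hv : 0 < pvGetG g (x + e.1) (y + e.2)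
            · rw [if_pos hv]
              have hpred : (decide (0 ≤ x + e.1) && decide (x + e.1 < n) &&
                  decide (0 ≤ y + e.2) && decide (y + e.2 < n) &&
                  decide (0 < pvGetG g (x + e.1) (y + e.2))) = true := by
                simp [h1, h2, h3, h4, hv]
              rw [hpred]
              have hxr' : x.toNat < (pvSetG g x y (pvGetG g x y + 1)).length := by
                rwa [length_pvSetG]
              have hyr' : y.toNat <
                  ((pvSetG g x y (pvGetG g x y + 1)).getD x.toNat []).length := by
                have : (pvSetG g x y (pvGetG g x y + 1)).getD x.toNat []
                    = (g.getD x.toNat []).set y.toNat (pvGetG g x y + 1) := by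
                  simp [pvSetG, List.getD_eq_getElem?_getD, hxr]
                rw [this, List.length_set]
                exact hyr
              rw [ih hd' _ hxr' hyr']
              rw [pvSetG_pvSetG, pvGetG_pvSetG_same _ hxr hyr]
              have hfc : ∀ q ∈ rest.map (fun e' => (x + e'.1, y + e'.2)),
                  (decide (0 ≤ q.1) && decide (q.1 < n) && decide (0 ≤ q.2) &&
                   decide (q.2 < n) &&
                   decide (0 < pvGetG (pvSetG g x y (pvGetG g x y + 1)) q.1 q.2))
                  = (decide (0 ≤ q.1) && decide (q.1 < n) && decide (0 ≤ q.2) &&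
                     decide (q.2 < n) && decide (0 < pvGetG g q.1 q.2)) := by
                intro q hq
                obtain ⟨e', he', rfl⟩ := List.mem_map.1 hq
                by_cases hA : 0 ≤ x + e'.1
                · have hne : x.toNat ≠ (x + e'.1).toNat := by
                    have := hd' e' he'; omega
                  rw [pvGetG_pvSetG_ne _ (Or.inl hne)]
                · simp [hA]
              rw [List.filter_congr hfc, if_pos rfl]
              simp only [List.length_cons]
              push_cast
              ring_nf
            · rw [if_neg hv]
              have hpred : (decide (0 ≤ x + e.1) && decide (x + e.1 < n) &&
                  decide (0 ≤ y + e.2) && decide (y + e.2 < n) &&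
                  decide (0 < pvGetG g (x + e.1) (y + e.2))) = false := by
                simp [hv]
              rw [hpred]
              exact ih hd' g hxr hyr
          · rw [if_neg (by omega)]
            have hpred : (decide (0 ≤ x + e.1) && decide (x + e.1 < n) &&
                decide (0 ≤ y + e.2) && decide (y + e.2 < n) &&
                decide (0 < pvGetG g (x + e.1) (y + e.2))) = false := by simp [h4]
            rw [hpred]
            exact ih hd' g hxr hyr
        · rw [if_neg (by omega)]
          have hpred : (decide (0 ≤ x + e.1) && decide (x + e.1 < n) &&
              decide (0 ≤ y + e.2) && decide (y + e.2 < n) &&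
              decide (0 < pvGetG g (x + e.1) (y + e.2))) = false := by simp [h3]
          rw [hpred]
          exact ih hd' g hxr hyr
      · rw [if_neg (by omega)]
        have hpred : (decide (0 ≤ x + e.1) && decide (x + e.1 < n) &&
            decide (0 ≤ y + e.2) && decide (y + e.2 < n) &&
            decide (0 < pvGetG g (x + e.1) (y + e.2))) = false := by simp [h2]
        rw [hpred]
        exact ih hd' g hxr hyr
    · rw [if_neg (by omega)]
      have hpred : (decide (0 ≤ x + e.1) && decide (x + e.1 < n) &&
          decide (0 ≤ y + e.2) && decide (y + e.2 < n) &&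
          decide (0 < pvGetG g (x + e.1) (y + e.2))) = false := by simp [h1]
      rw [hpred]
      exact ih hd' g hxr hyr


-- bridge: bug()'s inner loop over range(4) with table lookups IS a fold over the
-- four offset pairs
theorem bug_inner_eq (n : Int) (c : Int × Int) (g : List (List Int)) :
    (PySem.List.pyRange 0 4 1).foldl (fun g i =>
      if 0 ≤ c.1 + PySem.List.pyGetD pvDx2 i 0 ∧ c.1 + PySem.List.pyGetD pvDx2 i 0 ≤ n - 1 ∧
         0 ≤ c.2 + PySem.List.pyGetD pvDy2 i 0 ∧ c.2 + PySem.List.pyGetD pvDy2 i 0 ≤ n - 1 then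
        if 0 < pvGetG g (c.1 + PySem.List.pyGetD pvDx2 i 0) (c.2 + PySem.List.pyGetD pvDy2 i 0) then
          pvSetG g c.1 c.2 (pvGetG g c.1 c.2 + 1)
        else g
      else g) g
    = pvDirs.foldl (fun g e =>
        if 0 ≤ c.1 + e.1 ∧ c.1 + e.1 ≤ n - 1 ∧ 0 ≤ c.2 + e.2 ∧ c.2 + e.2 ≤ n - 1 then
          if 0 < pvGetG g (c.1 + e.1) (c.2 + e.2) then
            pvSetG g c.1 c.2 (pvGetG g c.1 c.2 + 1)
          else g
        else g) g := by
  rw [show PySem.List.pyRange 0 4 1 = [0, 1, 2, 3] by decide]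
  simp only [pvDirs, List.foldl_cons, List.foldl_nil,
    show PySem.List.pyGetD pvDx2 0 0 = 1 by decide,
    show PySem.List.pyGetD pvDx2 1 0 = -1 by decide,
    show PySem.List.pyGetD pvDx2 2 0 = -1 by decide,
    show PySem.List.pyGetD pvDx2 3 0 = 1 by decide,
    show PySem.List.pyGetD pvDy2 0 0 = 1 by decide,
    show PySem.List.pyGetD pvDy2 1 0 = -1 by decide,
    show PySem.List.pyGetD pvDy2 2 0 = 1 by decide,
    show PySem.List.pyGetD pvDy2 3 0 = -1 by decide]

-- rain() preserves the grid shape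
theorem pvRain_inv (N : Nat) (g : List (List Int)) (cloud : List (Int × Int))
    (hg : pvGridOK N g) : pvGridOK N (pvRain g cloud) :=
  List.foldlRecOn cloud _ hg (fun _ h _ _ => pvGridOK_pvSetG h _ _ _)

-- bug() over a whole cloud equals B's counting pass
theorem bug_eq (N : Nat) (cloud : List (Int × Int)) (hcl : pvCloudOK N cloud)
    (g : List (List Int)) (hg : pvGridOK N g) :
    pvBug (N : Int) g cloud
      = cloud.foldl (fun g c =>
          pvSetG g c.1 c.2 (pvGetG g c.1 c.2 +
            (([(c.1 + 1, c.2 + 1), (c.1 - 1, c.2 - 1), (c.1 - 1, c.2 + 1),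
               (c.1 + 1, c.2 - 1)].filter
                (fun q => decide (0 ≤ q.1) && decide (q.1 < (N : Int)) && decide (0 ≤ q.2) &&
                          decide (q.2 < (N : Int)) && decide (0 < pvGetG g q.1 q.2))).length
              : Int))) g := by
  unfold pvBug
  have hstep : ∀ acc c, pvGridOK N acc → c ∈ cloud →
      (PySem.List.pyRange 0 4 1).foldl (fun g i =>
        if 0 ≤ c.1 + PySem.List.pyGetD pvDx2 i 0 ∧ c.1 + PySem.List.pyGetD pvDx2 i 0 ≤ (N:Int) - 1 ∧
           0 ≤ c.2 + PySem.List.pyGetD pvDy2 i 0 ∧ c.2 + PySem.List.pyGetD pvDy2 i 0 ≤ (N:Int) - 1 then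
          if 0 < pvGetG g (c.1 + PySem.List.pyGetD pvDx2 i 0) (c.2 + PySem.List.pyGetD pvDy2 i 0) then
            pvSetG g c.1 c.2 (pvGetG g c.1 c.2 + 1)
          else g
        else g) acc
      = pvSetG acc c.1 c.2 (pvGetG acc c.1 c.2 +
          (([(c.1 + 1, c.2 + 1), (c.1 - 1, c.2 - 1), (c.1 - 1, c.2 + 1),
             (c.1 + 1, c.2 - 1)].filter
              (fun q => decide (0 ≤ q.1) && decide (q.1 < (N : Int)) && decide (0 ≤ q.2) &&
                        decide (q.2 < (N : Int)) && decide (0 < pvGetG acc q.1 q.2))).length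
            : Int)) := by
    intro acc c hP hm
    obtain ⟨hb1, hb2, hb3, hb4⟩ := hcl c hm
    have hxr : c.1.toNat < acc.length := by rw [hP.1]; omega
    have hrow : acc.getD c.1.toNat [] ∈ acc := by
      rw [List.getD_eq_getElem?_getD, List.getElem?_eq_getElem hxr]
      exact List.getElem_mem hxr
    have hyr : c.2.toNat < (acc.getD c.1.toNat []).length := by
      have := hP.2 _ hrow; omega
    rw [bug_inner_eq, bug_cell (N:Int) c.1 c.2 hb1 pvDirs (by decide) acc hxr hyr]
    have hmap : pvDirs.map (fun e => (c.1 + e.1, c.2 + e.2))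
        = [(c.1 + 1, c.2 + 1), (c.1 - 1, c.2 - 1), (c.1 - 1, c.2 + 1), (c.1 + 1, c.2 - 1)] := by
      simp [pvDirs, sub_eq_add_neg]
    rw [hmap]
  exact pvFoldlCongrInv (pvGridOK N) _ _ cloud g hg
    (fun acc c hP hm => by rw [hstep acc c hP hm]; exact pvGridOK_pvSetG hP _ _ _)
    hstep

-- B's refresh (set membership) is A's refresh (list membership)
theorem refresh_eq (n : Int) (g : List (List Int)) (prev : List (Int × Int)) :
    (PySem.List.pyRange 0 n 1).foldl (fun st2 x =>
      (PySem.List.pyRange 0 n 1).foldl (fun st2 y =>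
        if (x, y) ∉ PySem.Set.ofList prev then
          if 2 ≤ pvGetG st2.1 x y then
            (pvSetG st2.1 x y (pvGetG st2.1 x y - 2), st2.2 ++ [(x, y)])
          else st2
        else st2) st2) (g, ([] : List (Int × Int)))
    = pvRefresh n g prev := by
  unfold pvRefresh
  simp only [PySem.Set.mem_ofList]

-- refresh() keeps the grid shape and returns a cloud of in-range cells
theorem refresh_inv (N : Nat) (g : List (List Int)) (prev : List (Int × Int))
    (hg : pvGridOK N g) :
    pvGridOK N (pvRefresh (N:Int) g prev).1 ∧ pvCloudOK N (pvRefresh (N:Int) g prev).2 := by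
  unfold pvRefresh
  have h0 : pvGridOK N (g, ([] : List (Int × Int))).1
      ∧ pvCloudOK N (g, ([] : List (Int × Int))).2 :=
    ⟨hg, fun _ hc => absurd hc List.not_mem_nil⟩
  refine List.foldlRecOn (motive := fun (st : List (List Int) × List (Int × Int)) => pvGridOK N st.1 ∧ pvCloudOK N st.2) _ _ h0 ?_
  intro st hst x hx
  refine List.foldlRecOn (motive := fun (st : List (List Int) × List (Int × Int)) => pvGridOK N st.1 ∧ pvCloudOK N st.2) _ _ hst ?_
  intro st2 hst2 y hy
  by_cases hmem : (x, y) ∉ prev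
  · by_cases hw : 2 ≤ pvGetG st2.1 x y
    · rw [if_pos hmem, if_pos hw]
      refine ⟨pvGridOK_pvSetG hst2.1 _ _ _, ?_⟩
      intro c hc
      rcases List.mem_append.1 hc with h | h
      · exact hst2.2 c h
      · have hx' := (PySem.List.mem_pyRange_one).1 hx
        have hy' := (PySem.List.mem_pyRange_one).1 hy
        simp at h
        subst h
        exact ⟨hx'.1, hx'.2, hy'.1, hy'.2⟩
    · rw [if_pos hmem, if_neg hw]
      exact hst2
  · rw [if_neg hmem]
    exact hst2

-- moved clouds stay in range
theorem cloudOK_map (N : Nat) (hN : 0 < N) (s dx dy : Int) (cloud : List (Int × Int)) :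
    pvCloudOK N (cloud.map (fun p =>
      (PySem.Int.mod (p.1 + s * dx) (N:Int), PySem.Int.mod (p.2 + s * dy) (N:Int)))) := by
  intro c hc'
  obtain ⟨p, _, rfl⟩ := List.mem_map.1 hc'
  have hn : (0:Int) < (N:Int) := by exact_mod_cast hN
  exact ⟨PySem.Int.mod_nonneg _ hn, PySem.Int.mod_lt _ hn,
    PySem.Int.mod_nonneg _ hn, PySem.Int.mod_lt _ hn⟩

-- the two summation styles agree
theorem sum_eq (g : List (List Int)) :
    g.foldl (fun s row => row.foldl (fun s v => s + v) s) 0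
      = (g.map (fun row => row.foldl (fun s v => s + v) 0)).foldl (fun s v => s + v) 0 := by
  rw [List.foldl_map]
  refine PySem.List.foldl_congr_mem _ _ _ _ ?_
  intro acc row _
  rw [PySem.List.foldl_add (g := fun v => v), PySem.List.foldl_add (g := fun v => v)]
  simp


-- the per-command loop bodies of A and B agree (and preserve the invariants)
theorem fold_eq (N : Nat) (hN : 1 ≤ N) (o : List (List Int)) :
    ∀ st : List (List Int) × List (Int × Int), pvGridOK N st.1 →
    (pvCloudOK N st.2 ∨ ∀ m ∈ o, 1 ≤ m.getD 1 0) →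
    o.foldl (fun st m =>
        pvRefresh ((N : Int))
          (pvBug ((N : Int)) (pvRain st.1 (pvMove ((N : Int)) m st.2)) (pvMove ((N : Int)) m st.2))
          (pvMove ((N : Int)) m st.2)) st
      = o.foldl (fun (st : List (List Int) × List (Int × Int)) (m : List Int) =>
          List.foldl
            (fun (st2 : List (List Int) × List (Int × Int)) (x : Int) =>
              List.foldl
                (fun (st2 : List (List Int) × List (Int × Int)) (y : Int) =>
                  if (x, y) ∉
                      PySem.Set.ofList
                        (if 0 < m.getD 1 0 ∧ st.2 ≠ [] then List.map
                          (fun p =>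
                            (PySem.Int.mod (p.1 + m.getD 1 0 * PySem.List.pyGetD pvDx (m.getD 0 0 - 1) 0)
                                ((N : Int)),
                              PySem.Int.mod (p.2 + m.getD 1 0 * PySem.List.pyGetD pvDy (m.getD 0 0 - 1) 0)
                                ((N : Int))))
                          st.2 else st.2) then
                    if 2 ≤ pvGetG st2.1 x y then (pvSetG st2.1 x y (pvGetG st2.1 x y - 2), st2.2 ++ [(x, y)])
                    else st2
                  else st2)
                st2 (PySem.List.pyRange 0 ((N : Int)) 1))
            (List.foldl
              (fun (g : List (List Int)) (c : Int × Int) =>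
                pvSetG g c.1 c.2
                  (pvGetG g c.1 c.2 +
                    ↑(List.filter
                          (fun q =>
                            decide (0 ≤ q.1) && decide (q.1 < ((N : Int))) && decide (0 ≤ q.2) &&
                                decide (q.2 < ((N : Int))) &&
                              decide (0 < pvGetG g q.1 q.2))
                          [(c.1 + 1, c.2 + 1), (c.1 - 1, c.2 - 1), (c.1 - 1, c.2 + 1),
                            (c.1 + 1, c.2 - 1)]).length))
              (List.foldl (fun (g : List (List Int)) (c : Int × Int) => pvSetG g c.1 c.2 (pvGetG g c.1 c.2 + 1)) st.1
                (if 0 < m.getD 1 0 ∧ st.2 ≠ [] then List.map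
                  (fun p =>
                    (PySem.Int.mod (p.1 + m.getD 1 0 * PySem.List.pyGetD pvDx (m.getD 0 0 - 1) 0) ((N : Int)),
                      PySem.Int.mod (p.2 + m.getD 1 0 * PySem.List.pyGetD pvDy (m.getD 0 0 - 1) 0) ((N : Int))))
                  st.2 else st.2))
              (if 0 < m.getD 1 0 ∧ st.2 ≠ [] then List.map
                (fun p =>
                  (PySem.Int.mod (p.1 + m.getD 1 0 * PySem.List.pyGetD pvDx (m.getD 0 0 - 1) 0) ((N : Int)),
                    PySem.Int.mod (p.2 + m.getD 1 0 * PySem.List.pyGetD pvDy (m.getD 0 0 - 1) 0) ((N : Int))))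
                st.2 else st.2),
            ([] : List (Int × Int))) (PySem.List.pyRange 0 ((N : Int)) 1)) st := by
  induction o with
  | nil => intro st _ _; rfl
  | cons m rest ih =>
    intro st hg hc
    have hnpos : (0 : Int) < (N : Int) := by omega
    have hmv : pvMove (N : Int) m st.2 = (if 0 < m.getD 1 0 ∧ st.2 ≠ [] then
        st.2.map (fun p =>
          (PySem.Int.mod (p.1 + m.getD 1 0 * PySem.List.pyGetD pvDx (m.getD 0 0 - 1) 0) (N : Int),
           PySem.Int.mod (p.2 + m.getD 1 0 * PySem.List.pyGetD pvDy (m.getD 0 0 - 1) 0) (N : Int)))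
      else st.2) := by
      by_cases hgrd : 0 < m.getD 1 0 ∧ st.2 ≠ []
      · obtain ⟨hs0, _⟩ := hgrd
        rw [if_pos ⟨hs0, ‹st.2 ≠ []›⟩]
        unfold pvMove
        exact move_closed_pos _ hnpos _ _ _ (by omega) _
      · rw [if_neg hgrd]
        unfold pvMove
        rcases not_and_or.1 hgrd with hs | hne
        · rw [PySem.List.pyRange_one_eq_nil (by omega)]
          rfl
        · rw [not_not.mp hne, foldl_ignore]
          exact Function.iterate_fixed rfl _
    have hcl1 : pvCloudOK N (pvMove (N : Int) m st.2) := by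
      rw [hmv]
      by_cases hgrd : 0 < m.getD 1 0 ∧ st.2 ≠ []
      · rw [if_pos hgrd]
        exact cloudOK_map N (by omega) _ _ _ _
      · rw [if_neg hgrd]
        rcases hc with hc | hpos
        · exact hc
        · rcases not_and_or.1 hgrd with hs | hne
          · exact absurd (hpos m List.mem_cons_self) (by omega)
          · rw [not_not.mp hne]
            intro c hc'
            exact absurd hc' List.not_mem_nil
    have hg1 : pvGridOK N (pvRain st.1 (pvMove (N : Int) m st.2)) := pvRain_inv _ _ _ hg
    have hg2 : pvGridOK N
        (pvBug (N : Int) (pvRain st.1 (pvMove (N : Int) m st.2)) (pvMove (N : Int) m st.2)) := by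
      rw [bug_eq N _ hcl1 _ hg1]
      exact List.foldlRecOn _ _ hg1 (fun _ h _ _ => pvGridOK_pvSetG h _ _ _)
    have href := refresh_inv N
      (pvBug (N : Int) (pvRain st.1 (pvMove (N : Int) m st.2)) (pvMove (N : Int) m st.2))
      (pvMove (N : Int) m st.2) hg2
    have hstep : pvRefresh ((N : Int))
        (pvBug ((N : Int)) (pvRain st.1 (pvMove ((N : Int)) m st.2)) (pvMove ((N : Int)) m st.2))
        (pvMove ((N : Int)) m st.2)
      = List.foldl
            (fun (st2 : List (List Int) × List (Int × Int)) (x : Int) =>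
              List.foldl
                (fun (st2 : List (List Int) × List (Int × Int)) (y : Int) =>
                  if (x, y) ∉
                      PySem.Set.ofList
                        (if 0 < m.getD 1 0 ∧ st.2 ≠ [] then List.map
                          (fun p =>
                            (PySem.Int.mod (p.1 + m.getD 1 0 * PySem.List.pyGetD pvDx (m.getD 0 0 - 1) 0)
                                ((N : Int)),
                              PySem.Int.mod (p.2 + m.getD 1 0 * PySem.List.pyGetD pvDy (m.getD 0 0 - 1) 0)
                                ((N : Int))))
                          st.2 else st.2) then
                    if 2 ≤ pvGetG st2.1 x y then (pvSetG st2.1 x y (pvGetG st2.1 x y - 2), st2.2 ++ [(x, y)])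
                    else st2
                  else st2)
                st2 (PySem.List.pyRange 0 ((N : Int)) 1))
            (List.foldl
              (fun (g : List (List Int)) (c : Int × Int) =>
                pvSetG g c.1 c.2
                  (pvGetG g c.1 c.2 +
                    ↑(List.filter
                          (fun q =>
                            decide (0 ≤ q.1) && decide (q.1 < ((N : Int))) && decide (0 ≤ q.2) &&
                                decide (q.2 < ((N : Int))) &&
                              decide (0 < pvGetG g q.1 q.2))
                          [(c.1 + 1, c.2 + 1), (c.1 - 1, c.2 - 1), (c.1 - 1, c.2 + 1),
                            (c.1 + 1, c.2 - 1)]).length))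
              (List.foldl (fun (g : List (List Int)) (c : Int × Int) => pvSetG g c.1 c.2 (pvGetG g c.1 c.2 + 1)) st.1
                (if 0 < m.getD 1 0 ∧ st.2 ≠ [] then List.map
                  (fun p =>
                    (PySem.Int.mod (p.1 + m.getD 1 0 * PySem.List.pyGetD pvDx (m.getD 0 0 - 1) 0) ((N : Int)),
                      PySem.Int.mod (p.2 + m.getD 1 0 * PySem.List.pyGetD pvDy (m.getD 0 0 - 1) 0) ((N : Int))))
                  st.2 else st.2))
              (if 0 < m.getD 1 0 ∧ st.2 ≠ [] then List.map
                (fun p =>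
                  (PySem.Int.mod (p.1 + m.getD 1 0 * PySem.List.pyGetD pvDx (m.getD 0 0 - 1) 0) ((N : Int)),
                    PySem.Int.mod (p.2 + m.getD 1 0 * PySem.List.pyGetD pvDy (m.getD 0 0 - 1) 0) ((N : Int))))
                st.2 else st.2),
            ([] : List (Int × Int))) (PySem.List.pyRange 0 ((N : Int)) 1) := by
      rw [hmv] at hcl1 hg1 ⊢
      rw [bug_eq N _ hcl1 _ hg1, ← refresh_eq]
      simp only [pvRain]
    simp only [List.foldl_cons]
    rw [hstep] at href ⊢
    exact ih _ href.1 (Or.inl href.2)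
-- ===== VERDICT (by name: the statement is the Claim_ definition above) =====
theorem solution_spec : Claim_equal_solution := by
  intro l o _ hpre
  unfold Spec_solution solution solution_alt
  dsimp only
  obtain ⟨_, ho⟩ := hpre
  rcases ho with rfl | ⟨hN, hrows, hone⟩
  · simp only [List.foldl_nil]
    exact sum_eq l
  · rw [show ((l.length : Int) - 1 - 1) = (l.length : Int) - 2 by ring]
    have hcl : pvCloudOK l.length
        [((l.length : Int) - 1, 0), ((l.length : Int) - 1, 1),
         ((l.length : Int) - 2, 0), ((l.length : Int) - 2, 1)]
        ∨ ∀ m ∈ o, 1 ≤ m.getD 1 0 := by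
      by_cases h2 : 2 ≤ l.length
      · left
        intro c hc
        simp only [List.mem_cons, List.not_mem_nil, or_false] at hc
        rcases hc with rfl | rfl | rfl | rfl <;>
          exact ⟨by omega, by omega, by omega, by omega⟩
      · exact Or.inr (hone (by omega))
    rw [fold_eq l.length hN o _ ⟨rfl, hrows⟩ hcl]
    exact sum_eq _
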